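-- pv_equiv track=rewrite | github.com/MakusIV/Mutant-Chronicles-Manager | source/logic/Creatore_Mazzo.py | estrai_apostolo_da_keywords
-- ===== SOURCE A (Python) =====
-- from typing import List, Dict, Tuple, Optional, Any, Union
--
-- def estrai_apostolo_da_keywords(keywords: List[str]) -> str:
--     """
--     Estrae il nome dell'apostolo dalle keywords di un guerriero Oscura Legione.
--
--     Args:
--         keywords: Lista di keywords del guerriero
--
--     Returns:
--         Nome dell'apostolo o "Oscura Legione" se non è un seguace
--     """
--     if not keywords:
--         return "Oscura Legione"
--
--     # Mappatura delle keywords agli apostoli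
--     mapping_apostoli = {
--         "Seguace di Algeroth": "Algeroth",
--         "Seguace di Semai": "Semai",
--         "Seguace di Muawijhe": "Muawijhe",
--         "Seguace di Ilian": "Ilian",
--         "Seguace di Demnogonis": "Demnogonis",
--         # Varianti alternative
--         "Cultista di Muawijhe": "Muawijhe",
--         "Cultista di Demnogonis": "Demnogonis",
--         "Cultista di Semai": "Semai",
--         "Cultista di Ilian": "Ilian",
--         "Cultista di Algeroth": "Algeroth"
--     }
--
--     # Cerca nelle keywords del guerriero
--     for keyword in keywords:
--         if keyword in mapping_apostoli:
--             return mapping_apostoli[keyword]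
--
--     # Se non trova nessun seguace, ritorna la categoria generale
--     return "Oscura Legione"
-- ===== SOURCE B (Python) =====
-- from typing import List
--
-- _APOSTOLI = {"Algeroth", "Semai", "Muawijhe", "Ilian", "Demnogonis"}
-- _PREFISSI = ("Seguace di ", "Cultista di ")
--
-- def estrai_apostolo_da_keywords(keywords: List[str]) -> str:
--     for kw in keywords:
--         for pref in _PREFISSI:
--             if kw.startswith(pref):
--                 suf = kw[len(pref):]
--                 if suf in _APOSTOLI:
--                     return suf
--     return "Oscura Legione"
-- ===== Notes on version B (the rewrite author's own statement) =====
-- stated objective: idiomatic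
-- what changed: Replaces the flat 10-entry keyword-to-apostle dict lookup with structural recognition: a prefix test ('Seguace di '/'Cultista di ') plus a membership test of the remaining suffix in the 5-element apostle set.
import Mathlib
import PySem

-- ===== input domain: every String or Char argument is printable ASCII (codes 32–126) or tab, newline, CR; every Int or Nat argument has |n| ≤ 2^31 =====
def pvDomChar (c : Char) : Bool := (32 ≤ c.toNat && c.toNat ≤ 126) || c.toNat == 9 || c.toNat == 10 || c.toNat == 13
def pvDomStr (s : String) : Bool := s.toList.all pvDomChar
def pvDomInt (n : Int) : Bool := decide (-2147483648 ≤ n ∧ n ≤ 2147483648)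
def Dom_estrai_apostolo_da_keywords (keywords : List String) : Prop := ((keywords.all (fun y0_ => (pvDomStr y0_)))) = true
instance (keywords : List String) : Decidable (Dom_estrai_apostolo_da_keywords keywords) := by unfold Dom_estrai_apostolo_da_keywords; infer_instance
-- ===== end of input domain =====

-- B replaces A's flat 10-entry keyword→apostle dict with structural recognition:
-- a prefix test ("Seguace di "/"Cultista di ") plus membership of the suffix in the 5-apostle set (idiomatic; same cost).

-- ===== PORT A =====
-- the literal mapping dict of A (insertion order as written)
def pvMappingApostoli : PySem.Dict String String :=
  PySem.Dict.ofList
    [("Seguace di Algeroth", "Algeroth"), ("Seguace di Semai", "Semai"),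
     ("Seguace di Muawijhe", "Muawijhe"), ("Seguace di Ilian", "Ilian"),
     ("Seguace di Demnogonis", "Demnogonis"), ("Cultista di Muawijhe", "Muawijhe"),
     ("Cultista di Demnogonis", "Demnogonis"), ("Cultista di Semai", "Semai"),
     ("Cultista di Ilian", "Ilian"), ("Cultista di Algeroth", "Algeroth")]

-- "for keyword in keywords: if keyword in mapping: return mapping[keyword]" / fall through → "Oscura Legione"
def pvLoopA : List String → String
  | [] => "Oscura Legione"
  | kw :: rest =>
    match PySem.Dict.get? pvMappingApostoli kw with
    | some v => v
    | none => pvLoopA rest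

def estrai_apostolo_da_keywords (keywords : List String) : String :=
  if keywords = [] then "Oscura Legione" else pvLoopA keywords

-- ===== PORT B =====
def pvApostoli : List String := ["Algeroth", "Semai", "Muawijhe", "Ilian", "Demnogonis"]
def pvPrefissi : List String := ["Seguace di ", "Cultista di "]

-- inner 'for pref in _PREFISSI' with early return = findSome?; kw[len(pref):] = Str.slice with len(pref) ≥ 0 (exact)
def pvMatchKw (kw : String) : Option String :=
  pvPrefissi.findSome? (fun pref =>
    if PySem.Str.startswith kw pref then
      let suf := PySem.Str.slice kw (some (PySem.Str.len pref)) none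
      if suf ∈ pvApostoli then some suf else none
    else none)

def pvLoopB : List String → String
  | [] => "Oscura Legione"
  | kw :: rest =>
    match pvMatchKw kw with
    | some s => s
    | none => pvLoopB rest

def estrai_apostolo_da_keywords_alt (keywords : List String) : String :=
  pvLoopB keywords

-- ===== PRECONDITION & SPEC =====
def Spec_estrai_apostolo_da_keywords (keywords : List String) (out : String) : Prop := out = estrai_apostolo_da_keywords_alt keywords
instance (keywords : List String) (out : String) : Decidable (Spec_estrai_apostolo_da_keywords keywords out) := by unfold Spec_estrai_apostolo_da_keywords; infer_instance

-- ===== CLAIM (what is proved, stated in full; the proofs are below) =====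
def Claim_equal_estrai_apostolo_da_keywords : Prop := ∀ (keywords : List String), Dom_estrai_apostolo_da_keywords keywords → Spec_estrai_apostolo_da_keywords keywords (estrai_apostolo_da_keywords keywords)

-- ===== LEMMAS AND PROOFS =====

-- A matched prefix splits kw as prefix ++ slice-suffix.
theorem pv_pref (kw p : String) (hsw : PySem.Str.startswith kw p = true) :
    kw.toList = p.toList ++ (PySem.Str.slice kw (some (PySem.Str.len p)) none).toList := by
  have hpre : p.toList <+: kw.toList := (PySem.Chars.startswith_iff _ _).mp (by simpa using hsw)
  obtain ⟨t, ht⟩ := hpre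
  have hs : (PySem.Str.slice kw (some (PySem.Str.len p)) none).toList
      = kw.toList.drop p.toList.length := by
    simp [PySem.Str.toList_slice, PySem.Str.len_eq, PySem.List.slice_from_natCast]
  rw [hs, ← ht, List.drop_left]

-- One prefix branch of B: a successful branch yields suffix ∈ apostoli and the split of kw.
theorem pv_one (kw p s : String)
    (h : (if PySem.Str.startswith kw p then
            if PySem.Str.slice kw (some (PySem.Str.len p)) none ∈ pvApostoli then
              some (PySem.Str.slice kw (some (PySem.Str.len p)) none) else none
          else none) = some s) :
    s ∈ pvApostoli ∧ kw.toList = p.toList ++ s.toList := by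
  by_cases hsw : PySem.Str.startswith kw p = true
  · rw [if_pos hsw] at h
    by_cases hm : PySem.Str.slice kw (some (PySem.Str.len p)) none ∈ pvApostoli
    · rw [if_pos hm] at h
      have hes := Option.some.inj h
      exact ⟨hes ▸ hm, hes ▸ pv_pref kw p hsw⟩
    · rw [if_neg hm] at h; cases h
  · rw [if_neg hsw] at h; cases h

-- If B recognises kw, then kw is literally 'prefix ++ apostle'.
theorem pv_match_some (kw s : String) (h : pvMatchKw kw = some s) :
    ∃ p ∈ pvPrefissi, s ∈ pvApostoli ∧ kw.toList = p.toList ++ s.toList := by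
  unfold pvMatchKw at h
  simp only [pvPrefissi, List.findSome?] at h
  rcases hc1 : (if PySem.Str.startswith kw "Seguace di " then
                if PySem.Str.slice kw (some (PySem.Str.len "Seguace di ")) none ∈ pvApostoli then
                  some (PySem.Str.slice kw (some (PySem.Str.len "Seguace di ")) none) else none
              else none) with _ | b1
  · rw [hc1] at h
    rcases hc2 : (if PySem.Str.startswith kw "Cultista di " then
                if PySem.Str.slice kw (some (PySem.Str.len "Cultista di ")) none ∈ pvApostoli then
                  some (PySem.Str.slice kw (some (PySem.Str.len "Cultista di ")) none) else none
              else none) with _ | b2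
    · rw [hc2] at h; cases h
    · rw [hc2] at h
      simp only [Option.some.injEq] at h
      obtain ⟨hs, hsplit⟩ := pv_one kw "Cultista di " s (hc2.trans (congrArg some h))
      exact ⟨"Cultista di ", by simp [pvPrefissi], hs, hsplit⟩
  · rw [hc1] at h
    simp only [Option.some.injEq] at h
    obtain ⟨hs, hsplit⟩ := pv_one kw "Seguace di " s (hc1.trans (congrArg some h))
    exact ⟨"Seguace di ", by simp [pvPrefissi], hs, hsplit⟩

-- Per-keyword agreement of the two recognisers.
theorem pv_key_eq (kw : String) :
    PySem.Dict.get? pvMappingApostoli kw = pvMatchKw kw := by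
  by_cases h1 : kw = "Seguace di Algeroth"; · subst h1; decide
  by_cases h2 : kw = "Seguace di Semai"; · subst h2; decide
  by_cases h3 : kw = "Seguace di Muawijhe"; · subst h3; decide
  by_cases h4 : kw = "Seguace di Ilian"; · subst h4; decide
  by_cases h5 : kw = "Seguace di Demnogonis"; · subst h5; decide
  by_cases h6 : kw = "Cultista di Muawijhe"; · subst h6; decide
  by_cases h7 : kw = "Cultista di Demnogonis"; · subst h7; decide
  by_cases h8 : kw = "Cultista di Semai"; · subst h8; decide
  by_cases h9 : kw = "Cultista di Ilian"; · subst h9; decide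
  by_cases h10 : kw = "Cultista di Algeroth"; · subst h10; decide
  have hB : pvMatchKw kw = none := by
    rcases hm : pvMatchKw kw with _ | s
    · rfl
    · exfalso
      obtain ⟨p, hp, hs, hkw⟩ := pv_match_some kw s hm
      have hkw' : kw = String.ofList (p.toList ++ s.toList) := by
        have := congrArg String.ofList hkw
        simpa using this
      subst hkw'
      fin_cases hp <;> fin_cases hs <;> simp_all
  have hA : PySem.Dict.get? pvMappingApostoli kw = none := by
    rw [PySem.Dict.get?_eq_none_iff_not_mem_keys]
    have hk : pvMappingApostoli.keys =
        ["Seguace di Algeroth", "Seguace di Semai", "Seguace di Muawijhe", "Seguace di Ilian",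
         "Seguace di Demnogonis", "Cultista di Muawijhe", "Cultista di Demnogonis",
         "Cultista di Semai", "Cultista di Ilian", "Cultista di Algeroth"] := by decide
    rw [hk]
    simp [h1, h2, h3, h4, h5, h6, h7, h8, h9, h10]
  rw [hA, hB]

theorem pv_loop_eq (ks : List String) : pvLoopA ks = pvLoopB ks := by
  induction ks with
  | nil => rfl
  | cons kw rest ih =>
      simp only [pvLoopA, pvLoopB, pv_key_eq kw, ih]

-- ===== VERDICT (by name: the statement is the Claim_ definition above) =====
theorem estrai_apostolo_da_keywords_spec : Claim_equal_estrai_apostolo_da_keywords := by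
  intro ks _
  unfold Spec_estrai_apostolo_da_keywords estrai_apostolo_da_keywords estrai_apostolo_da_keywords_alt
  by_cases h : ks = []
  · subst h; rfl
  · simp [h, pv_loop_eq]
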